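-- pv_equiv track=rewrite | github.com/Parzival-Samanyolu/News-For-Me | generate_article.py | add_internal_link_hooks
-- ===== SOURCE A (Python) =====
-- def add_internal_link_hooks(html: str) -> str:
--     """
--     Add WordPress internal link shortcode hooks after every 2nd paragraph.
--     These will be processed by a WordPress plugin to inject related posts.
--     """
--     paragraphs_seen = 0
--     result = []
--     for line in html.split("\n"):
--         result.append(line)
--         if "<p>" in line or line.strip().startswith("<p"):
--             paragraphs_seen += 1
--             if paragraphs_seen == 2:
--                 result.append(
--                     '\n<div class="related-posts-inline">'
--                     '[related_posts_by_tax]'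
--                     '</div>\n'
--                 )
--     return "\n".join(result)
-- ===== SOURCE B (Python) =====
-- def add_internal_link_hooks(html: str) -> str:
--     """
--     Add WordPress internal link shortcode hooks after every 2nd paragraph.
--     These will be processed by a WordPress plugin to inject related posts.
--     """
--     lines = html.split("\n")
--     hits = [i for i, line in enumerate(lines)
--             if "<p>" in line or line.strip().startswith("<p")]
--     if len(hits) >= 2:
--         i = hits[1]
--         lines = (lines[:i + 1]
--                  + ['\n<div class="related-posts-inline">'
--                     '[related_posts_by_tax]'
--                     '</div>\n']
--                  + lines[i + 1:])
--     return "\n".join(lines)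
-- ===== Notes on version B (the rewrite author's own statement) =====
-- stated objective: alternative
-- what changed: B replaces A's stateful counter-and-conditional-append loop with an index-first-then-splice shape: it collects the indices of paragraph lines via enumerate, and if there are at least two, inserts the hook div by list slicing after the second one.
import Mathlib
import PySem

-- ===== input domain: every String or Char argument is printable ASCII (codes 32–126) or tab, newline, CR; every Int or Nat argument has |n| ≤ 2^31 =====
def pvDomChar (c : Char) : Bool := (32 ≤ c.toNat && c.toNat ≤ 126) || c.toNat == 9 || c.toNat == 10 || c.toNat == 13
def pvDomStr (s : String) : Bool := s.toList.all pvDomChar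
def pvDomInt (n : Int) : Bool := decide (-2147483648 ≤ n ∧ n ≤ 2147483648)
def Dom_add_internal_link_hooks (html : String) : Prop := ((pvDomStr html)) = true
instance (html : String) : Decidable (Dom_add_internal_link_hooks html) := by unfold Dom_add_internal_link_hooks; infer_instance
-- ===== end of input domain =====

-- B first computes the index of the second paragraph line, then splices the hook in by
-- slicing, instead of A's stateful counter-and-conditional-append loop (objective: alternative).

-- ===== PORT A =====
-- html.split("\n") with the non-empty literal separator never raises, so split? is always some; .getD [] is exact.
def add_internal_link_hooks (html : String) : String :=
  let st := ((PySem.Str.split? html "\n").getD []).foldl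
    (fun (st : List String × Int) line =>
      let result := st.1 ++ [line]
      if PySem.Str.isIn "<p>" line || PySem.Str.startswith (PySem.Str.strip line) "<p" then
        let seen := st.2 + 1
        if seen == 2 then
          (result ++ ["\n<div class=\"related-posts-inline\">[related_posts_by_tax]</div>\n"], seen)
        else (result, seen)
      else (result, st.2)) ([], 0)
  PySem.Str.join "\n" st.1

-- ===== PORT B =====
def add_internal_link_hooks_alt (html : String) : String :=
  let lines := (PySem.Str.split? html "\n").getD []
  let hits := (PySem.List.enumerate lines 0).filterMap
    (fun p => if PySem.Str.isIn "<p>" p.2 || PySem.Str.startswith (PySem.Str.strip p.2) "<p" then some p.1 else none)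
  let lines :=
    if 2 ≤ hits.length then
      let i := hits.getD 1 0
      PySem.List.slice lines none (some (i + 1))
        ++ ["\n<div class=\"related-posts-inline\">[related_posts_by_tax]</div>\n"]
        ++ PySem.List.slice lines (some (i + 1)) none
    else lines
  PySem.Str.join "\n" lines

-- ===== PRECONDITION & SPEC =====
def Spec_add_internal_link_hooks (html : String) (out : String) : Prop := out = add_internal_link_hooks_alt html
instance (html : String) (out : String) : Decidable (Spec_add_internal_link_hooks html out) := by unfold Spec_add_internal_link_hooks; infer_instance

-- ===== CLAIM (what is proved, stated in full; the proofs are below) =====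
def Claim_equal_add_internal_link_hooks : Prop := ∀ (html : String), Dom_add_internal_link_hooks html → Spec_add_internal_link_hooks html (add_internal_link_hooks html)

-- ===== LEMMAS AND PROOFS =====

/-- The paragraph test shared by both programs. -/
def pvPara (line : String) : Bool :=
  PySem.Str.isIn "<p>" line || PySem.Str.startswith (PySem.Str.strip line) "<p"

/-- The hook string. -/
def pvDiv : String := "\n<div class=\"related-posts-inline\">[related_posts_by_tax]</div>\n"

/-- A's loop body (definitionally equal to the lambda in the port). -/
def pvStep (st : List String × Int) (line : String) : List String × Int :=
  let result := st.1 ++ [line]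
  if pvPara line then
    let seen := st.2 + 1
    if seen == 2 then (result ++ [pvDiv], seen) else (result, seen)
  else (result, st.2)

/-- Countdown form of A's loop: insert pvDiv after the n-th (1-based) paragraph line. -/
def pvGof (n : Nat) : List String → List String
  | [] => []
  | l :: ls =>
    if pvPara l then
      if n == 1 then l :: pvDiv :: pvGof 0 ls else l :: pvGof (n - 1) ls
    else l :: pvGof n ls

/-- 0-based positions of the paragraph lines. -/
def pvIdxs : List String → List Nat
  | [] => []
  | l :: ls => if pvPara l then 0 :: (pvIdxs ls).map (· + 1) else (pvIdxs ls).map (· + 1)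

theorem pvGof_zero (ls : List String) : pvGof 0 ls = ls := by
  induction ls with
  | nil => rfl
  | cons l ls ih => simp [pvGof, ih]

theorem pvFoldl_eq (ls : List String) (acc : List String) (seen : Int) (h : 0 ≤ seen) :
    (ls.foldl pvStep (acc, seen)).1 = acc ++ pvGof (2 - seen).toNat ls := by
  induction ls generalizing acc seen with
  | nil => simp [pvGof]
  | cons l ls ih =>
    rw [List.foldl_cons]
    cases hpv : pvPara l with
    | false =>
      have hs : pvStep (acc, seen) l = (acc ++ [l], seen) := by simp [pvStep, hpv]
      rw [hs, ih _ _ h]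
      simp [pvGof, hpv]
    | true =>
      by_cases h2 : seen = 1
      · subst h2
        have hs : pvStep (acc, 1) l = (acc ++ [l] ++ [pvDiv], 2) := by simp [pvStep, hpv]
        rw [hs, ih _ _ (by omega)]
        have e0 : ((2 : Int) - 2).toNat = 0 := by omega
        have e1 : ((2 : Int) - 1).toNat = 1 := by omega
        simp [pvGof, hpv, pvGof_zero]
      · have hb : (seen + 1 == 2) = false := by simp; omega
        have hs : pvStep (acc, seen) l = (acc ++ [l], seen + 1) := by simp [pvStep, hpv, hb]
        rw [hs, ih _ _ (by omega)]
        have e1 : ((2 : Int) - (seen + 1)).toNat = (2 - seen).toNat - 1 := by omega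
        have e2 : ((2 - seen).toNat == 1) = false := by simp; omega
        simp [pvGof, hpv, e1, e2]

theorem pvGof_eq (n : Nat) (ls : List String) (h : 1 ≤ n) :
    pvGof n ls = match (pvIdxs ls)[n - 1]? with
      | some i => ls.take (i + 1) ++ [pvDiv] ++ ls.drop (i + 1)
      | none => ls := by
  induction ls generalizing n with
  | nil => simp [pvGof, pvIdxs]
  | cons l ls ih =>
    cases hpv : pvPara l with
    | false =>
      rw [show pvGof n (l :: ls) = l :: pvGof n ls by simp [pvGof, hpv], ih n h,
        show pvIdxs (l :: ls) = (pvIdxs ls).map (· + 1) by simp [pvIdxs, hpv]]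
      rw [List.getElem?_map]
      cases (pvIdxs ls)[n - 1]? with
      | none => simp
      | some i => simp
    | true =>
      by_cases h1 : n = 1
      · subst h1
        rw [show pvGof 1 (l :: ls) = l :: pvDiv :: pvGof 0 ls by simp [pvGof, hpv],
          show pvIdxs (l :: ls) = 0 :: (pvIdxs ls).map (· + 1) by simp [pvIdxs, hpv]]
        simp [pvGof_zero]
      · obtain ⟨m, rfl⟩ : ∃ m, n = m + 2 := ⟨n - 2, by omega⟩
        rw [show pvGof (m + 2) (l :: ls)
              = l :: pvGof (m + 1) ls by simp [pvGof, hpv],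
          ih (m + 1) (by omega),
          show pvIdxs (l :: ls) = 0 :: (pvIdxs ls).map (· + 1) by simp [pvIdxs, hpv]]
        have hix : (0 :: (pvIdxs ls).map (· + 1))[m + 2 - 1]? = ((pvIdxs ls)[m]?).map (· + 1) := by
          simp [List.getElem?_map]
        rw [hix]
        have hm : m + 1 - 1 = m := by omega
        rw [hm]
        cases (pvIdxs ls)[m]? with
        | none => simp
        | some i => simp

theorem pvHits_eq (ls : List String) : ∀ s : Int,
    (PySem.List.enumerate ls s).filterMap (fun p => if pvPara p.2 then some p.1 else none)
      = (pvIdxs ls).map (fun k : Nat => s + (k : Int)) := by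
  induction ls with
  | nil => intro s; simp [PySem.List.enumerate_nil, pvIdxs]
  | cons l ls ih =>
    intro s
    rw [PySem.List.enumerate_cons, List.filterMap_cons, ih (s + 1)]
    by_cases hpv : pvPara l = true
    · rw [show (if pvPara (s, l).2 = true then some (s, l).1 else none) = some s by simp [hpv]]
      rw [show pvIdxs (l :: ls) = 0 :: (pvIdxs ls).map (· + 1) by simp [pvIdxs, hpv]]
      rw [List.map_cons, List.map_map]
      show s :: _ = _
      congr 1
      · norm_num
      · apply List.map_congr_left
        intro k _
        push_cast [Function.comp]
        ring
    · rw [show (if pvPara (s, l).2 = true then some (s, l).1 else none) = none by simp [hpv]]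
      rw [show pvIdxs (l :: ls) = (pvIdxs ls).map (· + 1) by simp [pvIdxs, hpv]]
      rw [List.map_map]
      apply List.map_congr_left
      intro k _
      push_cast [Function.comp]
      ring

-- ===== VERDICT (by name: the statement is the Claim_ definition above) =====
theorem add_internal_link_hooks_spec : Claim_equal_add_internal_link_hooks := by
  intro html _
  show add_internal_link_hooks html = add_internal_link_hooks_alt html
  unfold add_internal_link_hooks add_internal_link_hooks_alt
  set ls := (PySem.Str.split? html "\n").getD [] with hls
  have hA : (ls.foldl
      (fun (st : List String × Int) line =>
        let result := st.1 ++ [line]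
        if PySem.Str.isIn "<p>" line || PySem.Str.startswith (PySem.Str.strip line) "<p" then
          let seen := st.2 + 1
          if seen == 2 then
            (result ++ ["\n<div class=\"related-posts-inline\">[related_posts_by_tax]</div>\n"], seen)
          else (result, seen)
        else (result, st.2)) ([], 0)).1
      = [] ++ pvGof ((2 : Int) - 0).toNat ls := pvFoldl_eq ls [] 0 (by omega)
  have hH : (PySem.List.enumerate ls 0).filterMap
      (fun p => if PySem.Str.isIn "<p>" p.2 || PySem.Str.startswith (PySem.Str.strip p.2) "<p" then some p.1 else none)
      = (pvIdxs ls).map (fun k : Nat => (0 : Int) + (k : Int)) := pvHits_eq ls 0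
  simp only [hA, hH, List.nil_append]
  have hG := pvGof_eq 2 ls (by omega)
  rw [show ((2 : Int) - 0).toNat = 2 by omega, hG]
  by_cases hlen : 2 ≤ (pvIdxs ls).length
  · obtain ⟨i, hi⟩ : ∃ i, (pvIdxs ls)[1]? = some i :=
      ⟨(pvIdxs ls)[1], List.getElem?_eq_getElem (by omega)⟩
    have hlen' : 2 ≤ ((pvIdxs ls).map (fun k : Nat => (0 : Int) + (k : Int))).length := by
      simpa using hlen
    rw [if_pos hlen', hi]
    have hget : ((pvIdxs ls).map (fun k : Nat => (0 : Int) + (k : Int))).getD 1 0 = (i : Int) := by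
      rw [List.getD_eq_getElem?_getD, List.getElem?_map, hi]
      simp
    rw [hget]
    rw [show (i : Int) + 1 = ((i + 1 : Nat) : Int) by push_cast; ring]
    rw [PySem.List.slice_to_natCast, PySem.List.slice_from_natCast]
    unfold pvDiv
    rfl
  · have hnone : (pvIdxs ls)[1]? = none := by
      rw [List.getElem?_eq_none_iff]; omega
    have hlen' : ¬ 2 ≤ ((pvIdxs ls).map (fun k : Nat => (0 : Int) + (k : Int))).length := by
      simpa using hlen
    rw [if_neg hlen', hnone]
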